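-- pv_equiv track=rewrite | github.com/sm-moshi/apple-mail-mcp | apple_mail_mcp/core.py | recipients_script
-- ===== SOURCE A (Python) =====
-- def escape_applescript(value: str) -> str:
--     """Escape a string for safe injection into AppleScript double-quoted strings.
--
--     Handles backslashes first, then double quotes, then newlines/returns/tabs
--     to prevent injection and AppleScript syntax errors.
--     """
--     return (
--         value.replace("\\", "\\\\")
--         .replace('"', '\\"')
--         .replace("\r\n", "\\n")
--         .replace("\r", "\\n")
--         .replace("\n", "\\n")
--         .replace("\t", "\\t")
--     )
--
-- def recipients_script(
--     addresses_csv: str | None,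
--     recipient_type: str,
--     message_var: str = "newMessage",
-- ) -> str:
--     """Return AppleScript snippet to add TO/CC/BCC recipients.
--
--     Args:
--         addresses_csv: Comma-separated email addresses, or None
--         recipient_type: "to", "cc", or "bcc"
--         message_var: AppleScript variable name of the message
--     """
--     if not addresses_csv:
--         return ""
--     lines = []
--     for addr in addresses_csv.split(","):
--         safe_addr = escape_applescript(addr.strip())
--         lines.append(
--             f"make new {recipient_type} recipient at end of "
--             f"{recipient_type} recipients of {message_var} "
--             f'with properties {{address:"{safe_addr}"}}'
--         )
--     return "\n            ".join(lines)
-- ===== SOURCE B (Python) =====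
-- def _escape_applescript_onepass(value: str) -> str:
--     """Single left-to-right pass replacing AppleScript-special characters.
--
--     A CR immediately followed by LF is consumed as one unit, so the
--     result matches the sequential-replace semantics of the original.
--     """
--     out = []
--     i = 0
--     n = len(value)
--     while i < n:
--         c = value[i]
--         if c == "\\":
--             out.append("\\\\")
--         elif c == '"':
--             out.append('\\"')
--         elif c == "\r":
--             out.append("\\n")
--             if i + 1 < n and value[i + 1] == "\n":
--                 i += 1
--         elif c == "\n":
--             out.append("\\n")
--         elif c == "\t":
--             out.append("\\t")
--         else:
--             out.append(c)
--         i += 1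
--     return "".join(out)
--
--
-- def recipients_script(
--     addresses_csv: str | None,
--     recipient_type: str,
--     message_var: str = "newMessage",
-- ) -> str:
--     if not addresses_csv:
--         return ""
--     return "\n            ".join(
--         f"make new {recipient_type} recipient at end of "
--         f"{recipient_type} recipients of {message_var} "
--         f'with properties {{address:"{_escape_applescript_onepass(addr.strip())}"}}'
--         for addr in addresses_csv.split(",")
--     )
-- ===== Notes on version B (the rewrite author's own statement) =====
-- stated objective: alternative
-- what changed: The escape helper's six sequential full-string .replace passes are replaced by a single left-to-right pass with a per-character dispatch that consumes CR+LF as one unit, and the line-building loop-with-append becomes a comprehension fed straight to join.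
import Mathlib
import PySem

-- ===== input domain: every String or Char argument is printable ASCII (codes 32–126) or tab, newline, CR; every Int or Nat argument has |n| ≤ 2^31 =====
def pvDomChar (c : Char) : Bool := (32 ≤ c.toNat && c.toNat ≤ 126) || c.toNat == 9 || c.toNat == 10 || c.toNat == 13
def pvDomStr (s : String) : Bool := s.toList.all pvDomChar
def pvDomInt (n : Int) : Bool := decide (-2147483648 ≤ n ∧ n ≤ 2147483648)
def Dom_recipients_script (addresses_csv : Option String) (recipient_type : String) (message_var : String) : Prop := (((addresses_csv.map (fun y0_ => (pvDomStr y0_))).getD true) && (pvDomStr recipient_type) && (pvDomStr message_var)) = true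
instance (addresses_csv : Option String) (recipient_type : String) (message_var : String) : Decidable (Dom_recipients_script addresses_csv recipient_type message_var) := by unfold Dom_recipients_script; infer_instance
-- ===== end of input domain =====

-- B replaces A's six sequential full-string `.replace` scans in the escape helper by a
-- single left-to-right pass with per-character dispatch (CR+LF consumed as one unit);
-- objective: alternative (one pass instead of six scans, same return value).

-- ===== PORT A =====
-- escape_applescript: six chained .replace passes, in A's order
def escape_applescript (value : String) : String :=
  PySem.Str.replace
    (PySem.Str.replace
      (PySem.Str.replace
        (PySem.Str.replace
          (PySem.Str.replace
            (PySem.Str.replace value "\\" "\\\\")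
            "\"" "\\\"")
          "\r\n" "\\n")
        "\r" "\\n")
      "\n" "\\n")
    "\t" "\\t"

def recipients_script (addresses_csv : Option String) (recipient_type : String) (message_var : String) : String :=
  match addresses_csv with
  | none => ""
  | some s =>
    if s = "" then ""
    else
      -- for addr in s.split(","): lines.append(f"...")   (sep "," ≠ "", so split? always returns some)
      let lines := ((PySem.Str.split? s ",").getD []).foldl
        (fun (acc : List String) (addr : String) =>
          let safe_addr := escape_applescript (PySem.Str.strip addr)
          acc ++ ["make new " ++ recipient_type ++ " recipient at end of " ++
                  recipient_type ++ " recipients of " ++ message_var ++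
                  " with properties {address:\"" ++ safe_addr ++ "\"}"]) []
      PySem.Str.join "\n            " lines

-- ===== PORT B =====
-- Source B's while loop: one pass over the characters, CR followed by LF consumed together
def escOnePass : List Char → List Char
  | [] => []
  | '\r' :: '\n' :: t => '\\' :: 'n' :: escOnePass t
  | c :: t =>
    (if c = '\\' then ['\\', '\\']
     else if c = '"' then ['\\', '"']
     else if c = '\r' then ['\\', 'n']
     else if c = '\n' then ['\\', 'n']
     else if c = '\t' then ['\\', 't']
     else [c]) ++ escOnePass t

def escape_applescript_onepass (value : String) : String :=
  String.ofList (escOnePass value.toList)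

def recipients_script_alt (addresses_csv : Option String) (recipient_type : String) (message_var : String) : String :=
  match addresses_csv with
  | none => ""
  | some s =>
    if s = "" then ""
    else
      PySem.Str.join "\n            "
        (((PySem.Str.split? s ",").getD []).map
          (fun addr =>
            "make new " ++ recipient_type ++ " recipient at end of " ++
            recipient_type ++ " recipients of " ++ message_var ++
            " with properties {address:\"" ++
            escape_applescript_onepass (PySem.Str.strip addr) ++ "\"}"))

-- ===== PRECONDITION & SPEC =====
def Spec_recipients_script (addresses_csv : Option String) (recipient_type : String) (message_var : String) (out : String) : Prop := out = recipients_script_alt addresses_csv recipient_type message_var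
instance (addresses_csv : Option String) (recipient_type : String) (message_var : String) (out : String) : Decidable (Spec_recipients_script addresses_csv recipient_type message_var out) := by unfold Spec_recipients_script; infer_instance

-- ===== CLAIM (what is proved, stated in full; the proofs are below) =====
def Claim_equal_recipients_script : Prop := ∀ (addresses_csv : Option String) (recipient_type : String) (message_var : String), Dom_recipients_script addresses_csv recipient_type message_var → Spec_recipients_script addresses_csv recipient_type message_var (recipients_script addresses_csv recipient_type message_var)

-- ===== LEMMAS AND PROOFS =====

-- r2 models A's "\r\n" -> "\\n" replace pass on char lists
def r2 : List Char → List Char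
  | [] => []
  | '\r' :: '\n' :: t => '\\' :: 'n' :: r2 t
  | c :: t => c :: r2 t

-- the backslash+quote passes composed, and the CR/LF/TAB passes composed
def kf (c : Char) : List Char :=
  if c = '\\' then ['\\', '\\'] else if c = '"' then ['\\', '"'] else [c]

def hf (c : Char) : List Char :=
  if c = '\r' then ['\\', 'n'] else if c = '\n' then ['\\', 'n']
  else if c = '\t' then ['\\', 't'] else [c]

lemma r2_cons_ne (c : Char) (l : List Char) (hc : c ≠ '\r') : r2 (c :: l) = c :: r2 l := by
  cases l with
  | nil => simp [r2]
  | cons y t => simp [r2, hc]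

lemma r2_cr (l : List Char) (h : ∀ t', l ≠ '\n' :: t') : r2 ('\r' :: l) = '\r' :: r2 l := by
  cases l with
  | nil => simp [r2]
  | cons y t =>
    have hy : y ≠ '\n' := fun hy => h t (by rw [hy])
    simp [r2, hy]

lemma esc_cons (c : Char) (l : List Char) (hc : c ≠ '\r') :
    escOnePass (c :: l) =
      (if c = '\\' then ['\\', '\\']
       else if c = '"' then ['\\', '"']
       else if c = '\r' then ['\\', 'n']
       else if c = '\n' then ['\\', 'n']
       else if c = '\t' then ['\\', 't']
       else [c]) ++ escOnePass l := by
  cases l with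
  | nil => simp [escOnePass]
  | cons y t => simp [escOnePass, hc]

lemma esc_cr (l : List Char) (h : ∀ t', l ≠ '\n' :: t') :
    escOnePass ('\r' :: l) = ['\\', 'n'] ++ escOnePass l := by
  cases l with
  | nil => simp [escOnePass]
  | cons y t =>
    have hy : y ≠ '\n' := fun hy => h t (by rw [hy])
    simp [escOnePass, hy]

-- single-character replace is a flatMap
lemma replace_go_single (c : Char) (nw : List Char) :
    ∀ (fuel : Nat) (s acc : List Char), s.length ≤ fuel →
      PySem.Chars.replace.go [c] nw fuel s acc =
        acc.reverse ++ s.flatMap (fun x => if x = c then nw else [x]) := by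
  intro fuel
  induction fuel with
  | zero =>
    intro s acc h
    have : s = [] := List.eq_nil_of_length_eq_zero (Nat.le_zero.mp h)
    subst this
    simp [PySem.Chars.replace.go]
  | succ n ih =>
    intro s acc h
    cases s with
    | nil => simp [PySem.Chars.replace.go]
    | cons x t =>
      simp only [PySem.Chars.replace.go]
      by_cases hx : x = c
      · subst hx
        have hpre : List.isPrefixOf [x] (x :: t) = true := by
          simp [List.isPrefixOf]
        simp only [hpre, if_pos]
        rw [show List.drop (List.length [x]) (x :: t) = t by simp]
        rw [ih t (nw.reverse ++ acc) (by simpa using Nat.le_of_succ_le_succ h)]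
        simp
      · have hpre : List.isPrefixOf [c] (x :: t) = false := by
          simp [List.isPrefixOf]
          intro hh; exact absurd hh.symm hx
        simp only [hpre]
        rw [if_neg (by simp)]
        rw [ih t (x :: acc) (by simpa using Nat.le_of_succ_le_succ h)]
        simp [hx]

lemma replace_single (s : List Char) (c : Char) (nw : List Char) :
    PySem.Chars.replace s [c] nw = s.flatMap (fun x => if x = c then nw else [x]) := by
  unfold PySem.Chars.replace
  rw [if_neg (by simp)]
  simpa using replace_go_single c nw s.length s [] le_rfl

-- the CRLF replace pass is r2
lemma replace_go_crlf :
    ∀ (fuel : Nat) (s acc : List Char), s.length ≤ fuel →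
      PySem.Chars.replace.go ['\r', '\n'] ['\\', 'n'] fuel s acc = acc.reverse ++ r2 s := by
  intro fuel
  induction fuel using Nat.strong_induction_on with
  | _ fuel ih =>
    intro s acc h
    match fuel, s with
    | 0, s =>
      have : s = [] := List.eq_nil_of_length_eq_zero (Nat.le_zero.mp h)
      subst this
      simp [PySem.Chars.replace.go, r2]
    | Nat.succ n, [] => simp [PySem.Chars.replace.go, r2]
    | Nat.succ n, x :: t =>
      simp only [PySem.Chars.replace.go]
      by_cases hpre : List.isPrefixOf ['\r', '\n'] (x :: t) = true
      · cases t with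
        | nil => simp [List.isPrefixOf] at hpre
        | cons y u =>
          have hxy : '\r' = x ∧ '\n' = y := by
            simpa [List.isPrefixOf] using hpre
          obtain ⟨hx, hy⟩ := hxy
          subst hx; subst hy
          rw [if_pos hpre]
          rw [show List.drop (List.length ['\r', '\n']) ('\r' :: '\n' :: u) = u by simp]
          have hlen : u.length ≤ n := by
            simp [List.length_cons] at h; omega
          rw [ih n (Nat.lt_succ_self n) u _ hlen]
          simp [r2]
      · rw [if_neg (by simpa using hpre)]
        rw [ih n (Nat.lt_succ_self n) t (x :: acc) (by simpa using Nat.le_of_succ_le_succ h)]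
        have hr2 : r2 (x :: t) = x :: r2 t := by
          by_cases hx : x = '\r'
          · subst hx
            apply r2_cr
            intro t' ht'
            apply hpre
            rw [ht']
            simp [List.isPrefixOf]
          · exact r2_cons_ne x t hx
        rw [hr2]
        simp

lemma replace_crlf (s : List Char) :
    PySem.Chars.replace s ['\r', '\n'] ['\\', 'n'] = r2 s := by
  unfold PySem.Chars.replace
  rw [if_neg (by simp)]
  simpa using replace_go_crlf s.length s [] le_rfl

-- heads produced by kf are never '\n' when the source char is not '\n'
lemma flatMap_kf_no_lf_head (t : List Char) (h : ∀ t', t ≠ '\n' :: t') :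
    ∀ t', List.flatMap kf t ≠ '\n' :: t' := by
  cases t with
  | nil => intro t' h'; simp at h'
  | cons d u =>
    intro t' h'
    have hd : d ≠ '\n' := fun hdn => h u (by rw [hdn])
    rw [List.flatMap_cons] at h'
    unfold kf at h'
    split_ifs at h' with h1 h2 <;> simp_all

-- the core fact: A's pass pipeline equals B's single pass
lemma pipeline_eq (s : List Char) :
    List.flatMap hf (r2 (List.flatMap kf s)) = escOnePass s := by
  induction s using escOnePass.induct with
  | case1 => simp [r2, escOnePass]
  | case2 t ih =>
    rw [show List.flatMap kf ('\r' :: '\n' :: t) = '\r' :: '\n' :: List.flatMap kf t by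
          simp [kf]]
    rw [show r2 ('\r' :: '\n' :: List.flatMap kf t) = '\\' :: 'n' :: r2 (List.flatMap kf t) by
          simp [r2]]
    rw [show escOnePass ('\r' :: '\n' :: t) = '\\' :: 'n' :: escOnePass t by simp [escOnePass]]
    simp only [List.flatMap_cons]
    rw [show hf '\\' = ['\\'] from rfl, show hf 'n' = ['n'] from rfl, ih]
    rfl
  | case3 c t hne ih =>
    have hno : ∀ t', t ≠ '\n' :: t' ∨ c ≠ '\r' := by
      intro t'
      by_cases hc : c = '\r'
      · left; intro ht; exact hne t' hc ht
      · right; exact hc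
    rw [List.flatMap_cons]
    by_cases hb : c = '\\'
    · subst hb
      rw [show kf '\\' = ['\\', '\\'] from rfl]
      simp only [List.cons_append, List.nil_append]
      rw [r2_cons_ne _ _ (by decide), r2_cons_ne _ _ (by decide)]
      simp only [List.flatMap_cons]
      rw [show hf '\\' = ['\\'] from rfl, ih, esc_cons _ _ (by decide)]
      rfl
    · by_cases hq : c = '"'
      · subst hq
        rw [show kf '"' = ['\\', '"'] from rfl]
        simp only [List.cons_append, List.nil_append]
        rw [r2_cons_ne _ _ (by decide), r2_cons_ne _ _ (by decide)]
        simp only [List.flatMap_cons]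
        rw [show hf '\\' = ['\\'] from rfl, show hf '"' = ['"'] from rfl, ih,
            esc_cons _ _ (by decide)]
        rfl
      · by_cases hr : c = '\r'
        · subst hr
          have htne : ∀ t', t ≠ '\n' :: t' := fun t' ht => hne t' rfl ht
          rw [show kf '\r' = ['\r'] from rfl]
          simp only [List.cons_append, List.nil_append]
          rw [r2_cr _ (flatMap_kf_no_lf_head t htne)]
          simp only [List.flatMap_cons]
          rw [show hf '\r' = ['\\', 'n'] from rfl, ih, esc_cr _ htne]
        · have hkc : kf c = [c] := by simp [kf, hb, hq]
          rw [hkc]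
          simp only [List.cons_append, List.nil_append]
          rw [r2_cons_ne _ _ hr]
          simp only [List.flatMap_cons]
          rw [ih, esc_cons _ _ hr]
          congr 1
          simp only [hb, hq, hr, ite_false]
          unfold hf
          split_ifs with h1 h2 <;> simp_all

lemma chain_eq_onepass (s : List Char) :
    PySem.Chars.replace
      (PySem.Chars.replace
        (PySem.Chars.replace
          (PySem.Chars.replace
            (PySem.Chars.replace
              (PySem.Chars.replace s ['\\'] ['\\', '\\'])
              ['"'] ['\\', '"'])
            ['\r', '\n'] ['\\', 'n'])
          ['\r'] ['\\', 'n'])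
        ['\n'] ['\\', 'n'])
      ['\t'] ['\\', 't'] = escOnePass s := by
  rw [replace_single s, replace_single, replace_crlf, replace_single, replace_single,
      replace_single]
  have h12 : List.flatMap (fun x => if x = '"' then ['\\', '"'] else [x])
      (List.flatMap (fun x => if x = '\\' then ['\\', '\\'] else [x]) s) = List.flatMap kf s := by
    rw [List.flatMap_assoc]
    congr 1
    funext c
    by_cases h1 : c = '\\' <;> by_cases h2 : c = '"' <;> simp_all [kf]
  rw [h12]
  have h345 : ∀ u : List Char,
      List.flatMap (fun x => if x = '\t' then ['\\', 't'] else [x])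
        (List.flatMap (fun x => if x = '\n' then ['\\', 'n'] else [x])
          (List.flatMap (fun x => if x = '\r' then ['\\', 'n'] else [x]) u)) =
      List.flatMap hf u := by
    intro u
    rw [List.flatMap_assoc, List.flatMap_assoc]
    congr 1
    funext c
    by_cases h1 : c = '\r' <;> by_cases h2 : c = '\n' <;> by_cases h3 : c = '\t' <;>
      simp_all [hf]
  rw [h345]
  exact pipeline_eq s

lemma escape_eq (v : String) : escape_applescript v = escape_applescript_onepass v := by
  have h : (escape_applescript v).toList = escOnePass v.toList := by
    simp only [escape_applescript, PySem.Str.toList_replace]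
    rw [show ("\\" : String).toList = ['\\'] from rfl,
        show ("\\\\" : String).toList = ['\\', '\\'] from rfl,
        show ("\"" : String).toList = ['"'] from rfl,
        show ("\\\"" : String).toList = ['\\', '"'] from rfl,
        show ("\r\n" : String).toList = ['\r', '\n'] from rfl,
        show ("\\n" : String).toList = ['\\', 'n'] from rfl,
        show ("\r" : String).toList = ['\r'] from rfl,
        show ("\n" : String).toList = ['\n'] from rfl,
        show ("\t" : String).toList = ['\t'] from rfl,
        show ("\\t" : String).toList = ['\\', 't'] from rfl]
    exact chain_eq_onepass v.toList
  calc escape_applescript v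
      = String.ofList (escape_applescript v).toList := String.ofList_toList.symm
    _ = String.ofList (escOnePass v.toList) := by rw [h]
    _ = escape_applescript_onepass v := rfl

-- ===== VERDICT (by name: the statement is the Claim_ definition above) =====
theorem recipients_script_spec : Claim_equal_recipients_script := by
  intro addresses_csv recipient_type message_var _
  unfold Spec_recipients_script recipients_script recipients_script_alt
  cases addresses_csv with
  | none => rfl
  | some s =>
    by_cases hs : s = ""
    · simp [hs]
    · simp only [hs, ite_false]
      rw [PySem.List.foldl_append_singleton_eq_map]
      simp [escape_eq]
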